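-- pv_equiv track=rewrite | github.com/Napier-JP/AtCoder | abc096_d.py | Eratosthenes_div5amari1
-- ===== SOURCE A (Python) =====
-- def Eratosthenes_div5amari1(N):
--     li = [i for i in range(2, N+1)]
--     serial = []
--     amari1 = []
--     while li:
--         li.sort()
--         num = li[0]
--         if num % 5 == 1:
--             amari1.append(num)
--         serial = [k * num for k in range(1, N//num + 1)]
--         li = list(set(li) - set(serial))
--     return(amari1)
-- ===== SOURCE B (Python) =====
-- def _is_prime(n):
--     d = 2
--     while d * d <= n:
--         if n % d == 0:
--             return False
--         d += 1
--     return True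
--
--
-- def Eratosthenes_div5amari1(N):
--     res = []
--     for n in range(2, N + 1):
--         if n % 5 == 1 and _is_prime(n):
--             res.append(n)
--     return res
-- ===== Notes on version B (the rewrite author's own statement) =====
-- stated objective: faster
-- what changed: A repeatedly sorts the candidate list and rebuilds it by Python set difference against the multiples of each extracted minimum; B makes a single left-to-right pass over the range, appending a number when its residue test passes and a trial-division primality test (divisors up to its square root) succeeds.
import Mathlib
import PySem

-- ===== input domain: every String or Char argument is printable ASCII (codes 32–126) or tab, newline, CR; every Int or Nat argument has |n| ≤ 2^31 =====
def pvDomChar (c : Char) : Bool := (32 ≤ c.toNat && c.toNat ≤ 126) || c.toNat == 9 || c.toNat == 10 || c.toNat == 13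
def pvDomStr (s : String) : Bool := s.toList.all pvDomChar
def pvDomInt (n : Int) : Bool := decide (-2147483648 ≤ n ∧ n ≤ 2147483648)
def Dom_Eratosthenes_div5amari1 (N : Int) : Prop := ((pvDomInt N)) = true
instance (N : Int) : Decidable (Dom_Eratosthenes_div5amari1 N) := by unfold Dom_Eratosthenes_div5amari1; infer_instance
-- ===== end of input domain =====

-- B replaces A's repeated sort / set-difference sieve (which re-sorts and rebuilds the candidate
-- set once per prime) by a single pass over 2..N with a trial-division primality test; faster.


-- ===== PORT A =====
-- serial = [k * num for k in range(1, N//num + 1)]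
def pvSerial (N num : Int) : List Int :=
  (PySem.List.pyRange 1 (PySem.Int.floordiv N num + 1) 1).map (fun k => k * num)

-- The while loop.  Fuel = the initial length of li: every iteration removes at least the current
-- minimum `num` (num = 1*num ∈ serial since num ≤ N), so the fuel is never exhausted on the real
-- runs (this is proved inside the equivalence proof, which tracks li's length).
-- `list(set(li) - set(serial))` is ported as PySem.Set.diff, which keeps li's order; the Python
-- value is the same finite set in an arbitrary (hash) order, and the next iteration of the loop
-- sorts li before using it, so the loop's behaviour only depends on that set.
def pvALoop (N : Int) : Nat → List Int → List Int → List Int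
  | 0, _, amari => amari
  | fuel+1, li, amari =>
    if li.isEmpty then amari
    else
      let li₁ := PySem.List.sorted li (fun x => x)
      let num := li₁.headD 0
      let amari' := if PySem.Int.mod num 5 == 1 then amari ++ [num] else amari
      let serial := pvSerial N num
      pvALoop N fuel (PySem.Set.diff (PySem.Set.ofList li₁) (PySem.Set.ofList serial)) amari'

def Eratosthenes_div5amari1 (N : Int) : List Int :=
  pvALoop N (PySem.List.pyRange 2 (N+1) 1).length (PySem.List.pyRange 2 (N+1) 1) []

-- ===== PORT B =====
-- trial division: while d*d <= n: if n % d == 0: return False; d += 1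
def pvIsPrimeLoop (n d : Int) : Bool :=
  if d * d ≤ n then
    (if PySem.Int.mod n d == 0 then false else pvIsPrimeLoop n (d+1))
  else true
termination_by (n + 2 - d).toNat
decreasing_by
  rename_i h _
  have h0 : 0 ≤ n := le_trans (mul_self_nonneg d) h
  have h1 : 2 * d - 1 ≤ n := by nlinarith [sq_nonneg (d - 1)]
  omega

def pvIsPrime (n : Int) : Bool := pvIsPrimeLoop n 2

def Eratosthenes_div5amari1_alt (N : Int) : List Int :=
  (PySem.List.pyRange 2 (N+1) 1).foldl
    (fun res n => if PySem.Int.mod n 5 == 1 && pvIsPrime n then res ++ [n] else res) []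

-- ===== PRECONDITION & SPEC =====
def Spec_Eratosthenes_div5amari1 (N : Int) (out : List Int) : Prop := out = Eratosthenes_div5amari1_alt N
instance (N : Int) (out : List Int) : Decidable (Spec_Eratosthenes_div5amari1 N out) := by unfold Spec_Eratosthenes_div5amari1; infer_instance

-- ===== CLAIM (what is proved, stated in full; the proofs are below) =====
def Claim_equal_Eratosthenes_div5amari1 : Prop := ∀ (N : Int), Dom_Eratosthenes_div5amari1 N → Spec_Eratosthenes_div5amari1 N (Eratosthenes_div5amari1 N)

-- ===== LEMMAS AND PROOFS =====

-- `pvQb c m` : m has no divisor d with 2 ≤ d < c  ("m survives sieving by everything below c")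
def pvQb (c m : Int) : Bool :=
  (PySem.List.pyRange 2 c 1).all (fun d => !(PySem.Int.mod m d == 0))

lemma pvQb_iff (c m : Int) : pvQb c m = true ↔ ∀ d : Int, 2 ≤ d → d < c → ¬ d ∣ m := by
  unfold pvQb
  rw [List.all_eq_true]
  constructor
  · intro h d h2 hc
    simpa [PySem.Int.mod_eq_zero_iff_dvd] using h d (PySem.List.mem_pyRange_one.mpr ⟨h2, hc⟩)
  · intro h d hd
    rw [PySem.List.mem_pyRange_one] at hd
    simpa [PySem.Int.mod_eq_zero_iff_dvd] using h d hd.1 hd.2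

lemma pvQb_mono {c c' m : Int} (h : c' ≤ c) (hq : pvQb c m = true) : pvQb c' m = true := by
  rw [pvQb_iff] at hq ⊢
  exact fun d h2 hc => hq d h2 (lt_of_lt_of_le hc h)

-- every d ≥ 2 has a "prime" divisor e (2 ≤ e ≤ d, e ∣ d, pvQb e e)
lemma pvExists_prime_dvd : ∀ (k : Nat) (d : Int), 2 ≤ d → d.toNat ≤ k →
    ∃ e : Int, 2 ≤ e ∧ e ≤ d ∧ e ∣ d ∧ pvQb e e = true := by
  intro k
  induction k with
  | zero => intro d h2 hk; omega
  | succ k ih =>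
    intro d h2 hk
    by_cases hq : pvQb d d = true
    · exact ⟨d, h2, le_refl d, dvd_refl d, hq⟩
    · rw [pvQb_iff] at hq
      push Not at hq
      obtain ⟨e, he2, hed, hdvd⟩ := hq
      obtain ⟨f, hf2, hfe, hfdvd, hfq⟩ := ih e he2 (by omega)
      exact ⟨f, hf2, by omega, hfdvd.trans hdvd, hfq⟩

-- membership in serial: for 2 ≤ m ≤ N and 2 ≤ num, m ∈ serial ↔ num ∣ m
lemma pvMem_serial {N num m : Int} (hnum : 2 ≤ num) (hm2 : 2 ≤ m) (hmN : m ≤ N) :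
    m ∈ pvSerial N num ↔ num ∣ m := by
  have hpos : (0:Int) < num := by omega
  unfold pvSerial
  rw [PySem.Int.floordiv_eq_ediv_of_pos hpos]
  simp only [List.mem_map, PySem.List.mem_pyRange_one]
  constructor
  · rintro ⟨k, ⟨hk1, hk2⟩, rfl⟩; exact dvd_mul_left num k
  · intro hdvd
    refine ⟨m / num, ⟨?_, ?_⟩, ?_⟩
    · have := Int.le_of_dvd (by omega) hdvd
      have : (1:Int) ≤ m / num := by
        rw [Int.le_ediv_iff_mul_le hpos]; omega
      omega
    · have : m / num ≤ N / num := by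
        rw [Int.le_ediv_iff_mul_le hpos, Int.ediv_mul_cancel hdvd]; exact hmN
      omega
    · exact Int.ediv_mul_cancel hdvd

-- the candidate list after sieving out all "primes" below c
def pvLiOf (N c : Int) : List Int :=
  (PySem.List.pyRange 2 (N+1) 1).filter (fun m => pvQb c m)

-- the accumulator after sieving out all primes below c
def pvAmariOf (c : Int) : List Int :=
  (PySem.List.pyRange 2 c 1).filter (fun m => pvQb m m && PySem.Int.mod m 5 == 1)

lemma pvMem_liOf {N c m : Int} : m ∈ pvLiOf N c ↔ (2 ≤ m ∧ m ≤ N) ∧ pvQb c m = true := by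
  unfold pvLiOf
  rw [List.mem_filter, PySem.List.mem_pyRange_one]
  constructor
  · rintro ⟨⟨h1, h2⟩, h3⟩; exact ⟨⟨h1, by omega⟩, h3⟩
  · rintro ⟨⟨h1, h2⟩, h3⟩; exact ⟨⟨h1, by omega⟩, h3⟩

lemma pvLiOf_pairwise (N c : Int) : (pvLiOf N c).Pairwise (· < ·) :=
  (PySem.List.pairwise_lt_pyRange_one 2 (N+1)).filter _

lemma pvLiOf_nodup (N c : Int) : (pvLiOf N c).Nodup :=
  (PySem.List.nodup_pyRange_one 2 (N+1)).filter _

lemma pvLiOf_sorted (N c : Int) : PySem.List.sorted (pvLiOf N c) (fun x => x) = pvLiOf N c :=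
  PySem.List.sorted_eq_self_of_pairwise _ _ ((pvLiOf_pairwise N c).imp le_of_lt)

-- if li is empty, every prime ≥ c exceeds N, so the accumulator is already final
lemma pvEmpty_case {N c : Int} (h2 : 2 ≤ c) (hN : c ≤ N + 1) (hnil : pvLiOf N c = []) :
    pvAmariOf c = pvAmariOf (N + 1) := by
  unfold pvAmariOf
  rw [PySem.List.pyRange_one_append 2 c (N+1) (by omega) hN, List.filter_append]
  have : (PySem.List.pyRange c (N+1)).filter (fun m => pvQb m m && PySem.Int.mod m 5 == 1) = [] := by
    rw [List.filter_eq_nil_iff]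
    intro m hm
    rw [PySem.List.mem_pyRange_one] at hm
    intro hpred
    simp only [Bool.and_eq_true] at hpred
    have hmem : m ∈ pvLiOf N c :=
      pvMem_liOf.mpr ⟨⟨by omega, by omega⟩, pvQb_mono hm.1 hpred.1⟩
    rw [hnil] at hmem; exact absurd hmem (List.not_mem_nil)
  rw [this, List.append_nil]

-- the head of the (sorted, nonempty) candidate list is prime, ≥ c, and the minimum
lemma pvHead_facts {N c : Int} (_h2 : 2 ≤ c) (hne : pvLiOf N c ≠ []) :
    2 ≤ (pvLiOf N c).headD 0 ∧ (pvLiOf N c).headD 0 ≤ N ∧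
    c ≤ (pvLiOf N c).headD 0 ∧ pvQb ((pvLiOf N c).headD 0) ((pvLiOf N c).headD 0) = true ∧
    (∀ m ∈ pvLiOf N c, (pvLiOf N c).headD 0 ≤ m) := by
  obtain ⟨num, rest, hcons⟩ := List.exists_cons_of_ne_nil hne
  have hmemnum : num ∈ pvLiOf N c := by rw [hcons]; exact List.mem_cons_self
  obtain ⟨⟨hnum2, hnumN⟩, hq⟩ := pvMem_liOf.mp hmemnum
  have hmin : ∀ m ∈ pvLiOf N c, num ≤ m := by
    intro m hm
    have hp := pvLiOf_pairwise N c
    rw [hcons] at hm hp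
    rcases List.mem_cons.mp hm with rfl | hm'
    · exact le_refl m
    · exact le_of_lt ((List.pairwise_cons.mp hp).1 m hm')
  have hcnum : c ≤ num := by
    by_contra hlt
    exact ((pvQb_iff c num).mp hq num hnum2 (by omega)) (dvd_refl num)
  have hqnum : pvQb num num = true := by
    rw [pvQb_iff]
    intro d hd2 hdnum hdvd
    obtain ⟨e, he2, hed, hedvd, heq⟩ := pvExists_prime_dvd d.toNat d hd2 (le_refl _)
    have hce : c ≤ e := by
      by_contra hlt
      exact ((pvQb_iff c num).mp hq e he2 (by omega)) (hedvd.trans hdvd)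
    have hmem : e ∈ pvLiOf N c :=
      pvMem_liOf.mpr ⟨⟨he2, by omega⟩, pvQb_mono hce heq⟩
    have := hmin e hmem
    omega
  rw [hcons] at *
  simp only [List.headD_cons]
  exact ⟨hnum2, hnumN, hcnum, hqnum, hmin⟩

-- one sieving step refines the candidate list from threshold c to threshold num+1
lemma pvStep_li {N c : Int} (h2 : 2 ≤ c) (hne : pvLiOf N c ≠ []) :
    (pvLiOf N c).filter
        (fun m => !((PySem.Set.ofList (pvSerial N ((pvLiOf N c).headD 0))).contains m))
      = pvLiOf N ((pvLiOf N c).headD 0 + 1) := by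
  obtain ⟨hnum2, hnumN, hcnum, hqnum, hmin⟩ := pvHead_facts h2 hne
  set num := (pvLiOf N c).headD 0 with hnumdef
  unfold pvLiOf
  rw [List.filter_filter]
  apply List.filter_congr
  intro m hm
  rw [PySem.List.mem_pyRange_one] at hm
  have hm2 : 2 ≤ m := hm.1
  have hmN : m ≤ N := by omega
  have hser : (PySem.Set.ofList (pvSerial N num)).contains m = true ↔ num ∣ m := by
    rw [PySem.Set.contains_iff, PySem.Set.mem_ofList]
    exact pvMem_serial hnum2 hm2 hmN
  rw [Bool.eq_iff_iff]
  simp only [Bool.and_eq_true, Bool.not_eq_true']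
  constructor
  · rintro ⟨hns, hq⟩
    have hnotdvd : ¬ num ∣ m := by
      intro hd
      rw [hser.mpr hd] at hns
      simp at hns
    rw [pvQb_iff]
    intro d hd2 hdlt hdvd
    by_cases hdc : d < c
    · exact ((pvQb_iff c m).mp hq d hd2 hdc) hdvd
    · obtain ⟨e, he2, hed, hedvd, heq⟩ := pvExists_prime_dvd d.toNat d hd2 (le_refl _)
      have hce : c ≤ e := by
        by_contra hlt
        exact ((pvQb_iff c m).mp hq e he2 (by omega)) (hedvd.trans hdvd)
      have hmem : e ∈ pvLiOf N c :=
        pvMem_liOf.mpr ⟨⟨he2, by omega⟩, pvQb_mono hce heq⟩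
      have henum : num ≤ e := hmin e hmem
      have heqnum : e = num := by omega
      exact hnotdvd (heqnum ▸ (hedvd.trans hdvd))
  · intro hq
    refine ⟨?_, pvQb_mono (by omega) hq⟩
    rw [Bool.eq_false_iff, Ne, hser]
    exact (pvQb_iff _ m).mp hq num hnum2 (by omega)

-- one sieving step extends the accumulator by num (iff num % 5 == 1)
lemma pvStep_amari {N c : Int} (h2 : 2 ≤ c) (hne : pvLiOf N c ≠ []) :
    pvAmariOf ((pvLiOf N c).headD 0 + 1)
      = pvAmariOf c ++
        (if PySem.Int.mod ((pvLiOf N c).headD 0) 5 == 1 then [(pvLiOf N c).headD 0] else []) := by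
  obtain ⟨hnum2, hnumN, hcnum, hqnum, hmin⟩ := pvHead_facts h2 hne
  set num := (pvLiOf N c).headD 0 with hnumdef
  unfold pvAmariOf
  rw [PySem.List.pyRange_one_append 2 c (num+1) (by omega) (by omega),
      List.filter_append, PySem.List.pyRange_one_succ_right hcnum, List.filter_append]
  have hmid : (PySem.List.pyRange c num).filter
      (fun m => pvQb m m && PySem.Int.mod m 5 == 1) = [] := by
    rw [List.filter_eq_nil_iff]
    intro m hm hpred
    rw [PySem.List.mem_pyRange_one] at hm
    simp only [Bool.and_eq_true] at hpred
    have hmem : m ∈ pvLiOf N c :=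
      pvMem_liOf.mpr ⟨⟨by omega, by omega⟩, pvQb_mono hm.1 hpred.1⟩
    have := hmin m hmem
    omega
  rw [hmid]
  simp only [List.nil_append, List.filter_singleton, hqnum, Bool.true_and]
  cases h5 : (PySem.Int.mod num 5 == 1) <;> simp [h5]

-- the loop invariant: from any threshold c with enough fuel, the loop produces the full answer
lemma pvALoop_eq (N : Int) : ∀ (fuel : Nat) (c : Int), 2 ≤ c → c ≤ N + 1 →
    (pvLiOf N c).length ≤ fuel →
    pvALoop N fuel (pvLiOf N c) (pvAmariOf c) = pvAmariOf (N + 1) := by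
  intro fuel
  induction fuel with
  | zero =>
    intro c h2 hN hlen
    have hnil : pvLiOf N c = [] := List.eq_nil_of_length_eq_zero (by omega)
    simp only [pvALoop]
    exact pvEmpty_case h2 hN hnil
  | succ fuel ih =>
    intro c h2 hN hlen
    by_cases hnil : pvLiOf N c = []
    · simp only [pvALoop, hnil, List.isEmpty_nil, if_pos]
      exact pvEmpty_case h2 hN hnil
    · obtain ⟨hnum2, hnumN, hcnum, hqnum, hmin⟩ := pvHead_facts h2 hnil
      set num := (pvLiOf N c).headD 0 with hnumdef
      have hisEmpty : (pvLiOf N c).isEmpty = false := by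
        rw [List.isEmpty_eq_false_iff]; exact hnil
      simp only [pvALoop, hisEmpty, Bool.false_eq_true, if_false, pvLiOf_sorted,
        PySem.Set.diff, PySem.Set.ofList_eq_self_of_nodup _ (pvLiOf_nodup N c)]
      rw [pvStep_li h2 hnil, ← hnumdef]
      have hamari : (if (PySem.Int.mod num 5 == 1) = true then pvAmariOf c ++ [num] else pvAmariOf c)
          = pvAmariOf (num + 1) := by
        rw [pvStep_amari h2 hnil, ← hnumdef]
        cases h5 : (PySem.Int.mod num 5 == 1) <;> simp [h5]
      rw [hamari]
      apply ih (num + 1) (by omega) (by omega)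
      -- fuel: num itself is filtered out (num ∈ serial), so the list shrank strictly
      have hlt : (pvLiOf N (num + 1)).length < (pvLiOf N c).length := by
        rw [← pvStep_li h2 hnil, ← hnumdef]
        rw [List.length_filter_lt_length_iff_exists]
        refine ⟨num, ?_, ?_⟩
        · exact pvMem_liOf.mpr ⟨⟨hnum2, hnumN⟩, pvQb_mono hcnum hqnum⟩
        · simp only [Bool.not_eq_true', Bool.not_eq_false]
          rw [PySem.Set.contains_iff, PySem.Set.mem_ofList]
          exact pvMem_serial hnum2 hnum2 hnumN |>.mpr (dvd_refl num)
      omega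

-- ===== B side: the trial-division loop tests exactly the divisors e ≥ d with e*e ≤ n =====
lemma pvIsPrimeLoop_iff : ∀ (k : Nat) (n d : Int), 2 ≤ d → (n + 2 - d).toNat ≤ k →
    (pvIsPrimeLoop n d = true ↔ ∀ e : Int, d ≤ e → e * e ≤ n → ¬ e ∣ n) := by
  intro k
  induction k with
  | zero =>
    intro n d hd2 hk
    rw [pvIsPrimeLoop]
    have hgt : ¬ (d * d ≤ n) := by
      intro hle
      have : 2 * d - 1 ≤ n := by nlinarith [sq_nonneg (d - 1)]
      omega
    rw [if_neg hgt]
    constructor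
    · intro _ e hde hee _
      exact absurd hee (by nlinarith)
    · intro _; rfl
  | succ k ih =>
    intro n d hd2 hk
    rw [pvIsPrimeLoop]
    by_cases hle : d * d ≤ n
    · rw [if_pos hle]
      by_cases hdvd : PySem.Int.mod n d == 0
      · rw [if_pos hdvd]
        simp only [Bool.false_eq_true, false_iff]
        push Not
        refine ⟨d, le_refl d, hle, ?_⟩
        rw [beq_iff_eq, PySem.Int.mod_eq_zero_iff_dvd] at hdvd
        exact hdvd
      · rw [if_neg hdvd]
        have hd2n : 2 * d - 1 ≤ n := by nlinarith [sq_nonneg (d - 1)]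
        rw [ih n (d+1) (by omega) (by omega)]
        constructor
        · intro h e hde hee hdvd'
          rcases eq_or_lt_of_le hde with rfl | hlt
          · rw [beq_iff_eq, PySem.Int.mod_eq_zero_iff_dvd] at hdvd
            exact hdvd hdvd'
          · exact h e (by omega) hee hdvd'
        · intro h e hde hee hdvd'
          exact h e (by omega) hee hdvd'
    · rw [if_neg hle]
      constructor
      · intro _ e hde hee _
        exact absurd hee (by nlinarith)
      · intro _; rfl

-- trial division up to √n decides "no divisor in [2, n)"
lemma pvIsPrime_eq_pvQb {n : Int} (hn : 2 ≤ n) : pvIsPrime n = pvQb n n := by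
  rw [Bool.eq_iff_iff, pvIsPrime,
    pvIsPrimeLoop_iff (n + 2 - 2).toNat n 2 (by omega) (le_refl _), pvQb_iff]
  constructor
  · intro h d hd2 hdn hdvd
    obtain ⟨k, hk⟩ := hdvd
    have hk2 : 2 ≤ k := by nlinarith
    by_cases hdd : d * d ≤ n
    · exact h d hd2 hdd ⟨k, hk⟩
    · have hkd : k < d := by nlinarith
      exact h k hk2 (by nlinarith) ⟨d, by linarith [hk, mul_comm d k]⟩
  · intro h e he2 hee hdvd
    have hen : e < n := by nlinarith
    exact h e he2 hen hdvd

lemma pvAlt_eq (N : Int) : Eratosthenes_div5amari1_alt N = pvAmariOf (N + 1) := by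
  unfold Eratosthenes_div5amari1_alt pvAmariOf
  rw [PySem.List.foldl_append_if_eq_filter]
  rw [List.nil_append]
  apply List.filter_congr
  intro m hm
  rw [PySem.List.mem_pyRange_one] at hm
  rw [pvIsPrime_eq_pvQb hm.1, Bool.and_comm]

-- ===== VERDICT (by name: the statement is the Claim_ definition above) =====
theorem Eratosthenes_div5amari1_spec : Claim_equal_Eratosthenes_div5amari1 := by
  intro N _
  unfold Spec_Eratosthenes_div5amari1 Eratosthenes_div5amari1
  rw [pvAlt_eq]
  by_cases hN : 1 ≤ N
  · have hli : PySem.List.pyRange 2 (N+1) 1 = pvLiOf N 2 := by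
      unfold pvLiOf
      rw [List.filter_eq_self.mpr]
      intro m _
      rw [pvQb_iff]
      intro d hd2 hdc hdvd
      omega
    have hamari : ([] : List Int) = pvAmariOf 2 := by
      unfold pvAmariOf
      rw [PySem.List.pyRange_one_eq_nil (by omega)]
      rfl
    rw [hli, hamari]
    exact pvALoop_eq N _ 2 (by omega) (by omega) (le_refl _)
  · have hnil : PySem.List.pyRange 2 (N+1) 1 = [] := PySem.List.pyRange_one_eq_nil (by omega)
    rw [hnil]
    simp only [List.length_nil, pvALoop]
    unfold pvAmariOf
    rw [PySem.List.pyRange_one_eq_nil (by omega)]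
    rfl
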